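-- pv_equiv track=rewrite | github.com/Aaslknc/PYTHON | unidade3/t2questao2.py | gerar_matriz
-- ===== SOURCE A (Python) =====
-- def gerar_matriz(ordem):
--     matriz = []
--     for i in range(ordem):
--         linha = []
--         for j in range(ordem):
--             elemento = 2**(j+i)
--             linha.append(elemento)
--
--         matriz.append(linha)
--
--     return matriz
-- ===== SOURCE B (Python) =====
-- def gerar_matriz(ordem):
--     # outer-product form: build the power vector once
--     # by doubling, then each row is the previous row doubled elementwise.
--     if ordem <= 0:
--         return []
--     p = [1]
--     last = 1
--     for _ in range(ordem - 1):
--         last *= 2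
--         p.append(last)
--     matriz = []
--     row = p
--     for _ in range(ordem):
--         matriz.append(row)
--         row = [x * 2 for x in row]
--     return matriz
-- ===== Notes on version B (the rewrite author's own statement) =====
-- stated objective: alternative
-- what changed: Replaces the per-cell 2**(j+i) exponentiation with incrementally maintained state: a power vector built once by doubling, and each row obtained by doubling the previous row elementwise.
import Mathlib
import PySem

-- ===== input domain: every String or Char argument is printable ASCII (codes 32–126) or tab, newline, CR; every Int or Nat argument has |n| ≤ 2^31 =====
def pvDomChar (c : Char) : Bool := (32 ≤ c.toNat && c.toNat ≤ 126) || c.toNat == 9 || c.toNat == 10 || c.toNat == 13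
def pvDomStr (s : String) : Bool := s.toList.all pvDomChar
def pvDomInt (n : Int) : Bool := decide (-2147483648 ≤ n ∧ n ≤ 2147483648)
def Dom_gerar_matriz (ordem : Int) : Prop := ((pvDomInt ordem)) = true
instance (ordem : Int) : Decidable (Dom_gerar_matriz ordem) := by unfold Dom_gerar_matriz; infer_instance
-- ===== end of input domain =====

-- B replaces A's per-cell exponentiation by incremental doubling: a power vector
-- built once, each row obtained by doubling the previous row elementwise.

-- ===== PORT A =====
def gerar_matriz (ordem : Int) : List (List Int) :=
  (PySem.List.pyRange 0 ordem 1).foldl (fun matriz i =>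
    matriz ++ [(PySem.List.pyRange 0 ordem 1).foldl (fun linha j =>
      linha ++ [2 ^ (j + i).toNat]) []]) []

-- ===== PORT B =====
-- build the power vector p by doubling `last`
def pvBuildP : Nat → Int → List Int → List Int
  | 0, _, p => p
  | k+1, last, p => pvBuildP k (last * 2) (p ++ [last * 2])

-- append `row`, then double it elementwise, k times
def pvBuildRows : Nat → List Int → List (List Int) → List (List Int)
  | 0, _, m => m
  | k+1, row, m => pvBuildRows k (row.map (· * 2)) (m ++ [row])

def gerar_matriz_alt (ordem : Int) : List (List Int) :=
  if ordem ≤ 0 then []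
  else
    let p := pvBuildP (ordem.toNat - 1) 1 [1]
    pvBuildRows ordem.toNat p []

-- ===== PRECONDITION & SPEC =====
def Spec_gerar_matriz (ordem : Int) (out : List (List Int)) : Prop := out = gerar_matriz_alt ordem
instance (ordem : Int) (out : List (List Int)) : Decidable (Spec_gerar_matriz ordem out) := by unfold Spec_gerar_matriz; infer_instance

-- ===== CLAIM (what is proved, stated in full; the proofs are below) =====
def Claim_equal_gerar_matriz : Prop := ∀ (ordem : Int), Dom_gerar_matriz ordem → Spec_gerar_matriz ordem (gerar_matriz ordem)

-- ===== LEMMAS AND PROOFS =====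

theorem pvFoldl_snoc {α β : Type} (f : α → β) :
    ∀ (xs : List α) (acc : List β),
      xs.foldl (fun a x => a ++ [f x]) acc = acc ++ xs.map f := by
  intro xs
  induction xs with
  | nil => simp
  | cons x xs ih => intro acc; simp [ih]

theorem pvBuildP_spec :
    ∀ (k : Nat) (last : Int) (p : List Int),
      pvBuildP k last p = p ++ (List.range k).map (fun t => last * 2 ^ (t + 1)) := by
  intro k
  induction k with
  | zero => intro last p; simp [pvBuildP]
  | succ k ih =>
    intro last p
    rw [pvBuildP, ih, List.range_succ_eq_map]
    simp [List.map_map, Function.comp]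
    intro a _
    ring

theorem pvBuildRows_spec :
    ∀ (k : Nat) (row : List Int) (m : List (List Int)),
      pvBuildRows k row m = m ++ (List.range k).map (fun t => row.map (· * 2 ^ t)) := by
  intro k
  induction k with
  | zero => intro row m; simp [pvBuildRows]
  | succ k ih =>
    intro row m
    rw [pvBuildRows, ih, List.range_succ_eq_map]
    simp [List.map_map, Function.comp]
    intro a _ x _
    left
    ring

-- canonical form of both programs
theorem pvA_canon (ordem : Int) :
    gerar_matriz ordem =
      (List.range ordem.toNat).map (fun i =>
        (List.range ordem.toNat).map (fun j => (2 : Int) ^ (j + i))) := by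
  unfold gerar_matriz
  simp only [pvFoldl_snoc, List.nil_append]
  rw [PySem.List.pyRange_one]
  simp only [List.map_map, zero_add, Int.sub_zero]
  apply List.map_congr_left
  intro i _
  apply List.map_congr_left
  intro j _
  simp only [Function.comp_apply]
  congr 1

theorem pvB_canon (ordem : Int) :
    gerar_matriz_alt ordem =
      (List.range ordem.toNat).map (fun i =>
        (List.range ordem.toNat).map (fun j => (2 : Int) ^ (j + i))) := by
  unfold gerar_matriz_alt
  split_ifs with h
  · have : ordem.toNat = 0 := by omega
    simp [this]
  · have hn : 1 ≤ ordem.toNat := by omega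
    rw [pvBuildRows_spec, pvBuildP_spec]
    simp only [List.nil_append]
    apply List.map_congr_left
    intro i _
    -- row i: ([1] ++ (range (n-1)).map (2^(·+1))).map (· * 2^i) = (range n).map (2^(·+i))
    obtain ⟨m, hm⟩ : ∃ m, ordem.toNat = m + 1 := ⟨ordem.toNat - 1, by omega⟩
    rw [hm]
    simp only [Nat.add_sub_cancel]
    rw [List.range_succ_eq_map]
    simp [List.map_map, Function.comp]
    intro a _
    ring

-- ===== VERDICT (by name: the statement is the Claim_ definition above) =====
theorem gerar_matriz_spec : Claim_equal_gerar_matriz := by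
  intro ordem _
  unfold Spec_gerar_matriz
  rw [pvA_canon, pvB_canon]
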